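-- pv_equiv track=rewrite | github.com/BhargavVemula/python-basic | passinglisttofunc.py | count
-- ===== SOURCE A (Python) =====
-- def count(lst):
--     above = 0
--     below = 0
--     for i in lst:
--         if len(i) > 5:
--             above = above+1
--         else:
--             below = below+1
--     return above, below
-- ===== SOURCE B (Python) =====
-- def count(lst):
--     lens = sorted(len(s) for s in lst)
--     lo, hi = 0, len(lens)
--     while lo < hi:
--         mid = (lo + hi) // 2
--         if lens[mid] > 5:
--             hi = mid
--         else:
--             lo = mid + 1
--     return len(lens) - lo, lo
-- ===== Notes on version B (the rewrite author's own statement) =====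
-- stated objective: alternative
-- what changed: Sorts the string lengths and finds the above/below split point by an explicit binary search over the sorted array, instead of a linear scan with two parallel counters.
import Mathlib
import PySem

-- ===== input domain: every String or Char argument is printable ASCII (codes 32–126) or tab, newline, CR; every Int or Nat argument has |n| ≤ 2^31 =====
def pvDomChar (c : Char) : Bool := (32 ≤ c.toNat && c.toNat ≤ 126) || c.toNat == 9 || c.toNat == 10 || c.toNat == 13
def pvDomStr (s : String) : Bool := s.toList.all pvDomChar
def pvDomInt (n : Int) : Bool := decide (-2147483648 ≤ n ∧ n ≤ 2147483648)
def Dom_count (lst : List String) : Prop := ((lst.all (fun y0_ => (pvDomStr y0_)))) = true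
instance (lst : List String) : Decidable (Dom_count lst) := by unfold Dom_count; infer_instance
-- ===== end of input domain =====

-- B: sorts the string lengths and locates the above/below split by binary search (alternative algorithm, same result).
-- ===== PORT A =====
-- literal port of A: one fold over (above, below) with the same if/else
def count (lst : List String) : Int × Int :=
  let s := lst.foldl (fun (ab : Int × Int) i =>
    if PySem.Str.len i > 5 then (ab.1 + 1, ab.2) else (ab.1, ab.2 + 1)) (0, 0)
  (s.1, s.2)

-- ===== PORT B =====
-- the while-loop of Source B, with fuel hi - lo (the loop shrinks the interval each turn, so the
-- initial fuel len(lens) is never exhausted); lens[mid] is always in range, getD 0 is a totalization guard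
def bsLoop (lens : List Int) (fuel : Nat) (lo hi : Int) : Int :=
  match fuel with
  | 0 => lo
  | fuel + 1 =>
    if lo < hi then
      let mid := PySem.Int.floordiv (lo + hi) 2
      if (PySem.List.pyGet? lens mid).getD 0 > 5 then bsLoop lens fuel lo mid
      else bsLoop lens fuel (mid + 1) hi
    else lo

-- port of B: sorted lengths, then binary search for the first index whose length exceeds 5
def count_alt (lst : List String) : Int × Int :=
  let lens := PySem.List.sorted (lst.map (fun s => PySem.Str.len s)) (fun x => x) false
  let lo := bsLoop lens lens.length 0 (lens.length : Int)
  ((lens.length : Int) - lo, lo)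

-- ===== PRECONDITION & SPEC =====
def Spec_count (lst : List String) (out : Int × Int) : Prop := out = count_alt lst
instance (lst : List String) (out : Int × Int) : Decidable (Spec_count lst out) := by unfold Spec_count; infer_instance

-- ===== CLAIM (what is proved, stated in full; the proofs are below) =====
def Claim_equal_count : Prop := ∀ (lst : List String), Dom_count lst → Spec_count lst (count lst)

-- ===== LEMMAS AND PROOFS =====

-- A's fold computes (#{len > 5}, #{len ≤ 5})
lemma count_fold (lst : List String) (a b : Int) :
    lst.foldl (fun (ab : Int × Int) i =>
      if PySem.Str.len i > 5 then (ab.1 + 1, ab.2) else (ab.1, ab.2 + 1)) (a, b)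
    = (a + ((lst.countP (fun i => decide (5 < PySem.Str.len i))) : Int),
       b + ((lst.countP (fun i => !decide (5 < PySem.Str.len i))) : Int)) := by
  induction lst generalizing a b with
  | nil => simp
  | cons h t ih =>
    simp only [List.foldl_cons, List.countP_cons]
    by_cases hc : PySem.Str.len h > 5
    · rw [if_pos hc, ih, decide_eq_true hc]
      simp [Prod.ext_iff]
      omega
    · have hc' : decide (5 < PySem.Str.len h) = false := by simpa using hc
      rw [if_neg hc, ih, hc']
      simp [Prod.ext_iff]
      omega

-- in a ≤-sorted Int list, the elements ≤ 5 are exactly the first countP (· ≤ 5) positions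
lemma sorted_index_iff (l : List Int) (hs : l.Pairwise (· ≤ ·)) (i : Nat) (hi : i < l.length) :
    l[i] ≤ 5 ↔ i < l.countP (fun x => x ≤ 5) := by
  induction l generalizing i with
  | nil => simp at hi
  | cons x t ih =>
    rcases List.pairwise_cons.mp hs with ⟨hx, ht⟩
    by_cases hx5 : x ≤ 5
    · cases i with
      | zero => simp [hx5]
      | succ j =>
        simp only [List.getElem_cons_succ, List.countP_cons, decide_eq_true hx5]
        rw [ih ht j (by simpa using hi)]
        simp
    · have ht0 : t.countP (fun x => x ≤ 5) = 0 := by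
        rw [List.countP_eq_zero]
        intro y hy
        have := hx y hy
        simp
        omega
      cases i with
      | zero => simp [hx5, ht0]
      | succ j =>
        have hj : j < t.length := by simpa using hi
        have hxj := hx t[j] (List.getElem_mem hj)
        simp only [List.getElem_cons_succ, List.countP_cons, hx5, decide_false, ht0]
        constructor
        · intro h
          omega
        · intro h
          simp at h
-- the binary search converges to countP (· ≤ 5) from any bracketing interval
lemma bsLoop_eq (l : List Int) (hs : l.Pairwise (· ≤ ·)) (fuel : Nat) (lo hi : Int)
    (hlo : 0 ≤ lo) (hhi : hi ≤ (l.length : Int))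
    (hc1 : lo ≤ (l.countP (fun x => x ≤ 5) : Int))
    (hc2 : (l.countP (fun x => x ≤ 5) : Int) ≤ hi)
    (hfuel : hi - lo ≤ (fuel : Int)) :
    bsLoop l fuel lo hi = (l.countP (fun x => x ≤ 5) : Int) := by
  induction fuel generalizing lo hi with
  | zero =>
    simp only [bsLoop]
    omega
  | succ fuel ih =>
    rw [bsLoop]
    by_cases hlt : lo < hi
    · simp only [hlt, if_true]
      obtain ⟨hm1, hm2⟩ := PySem.Int.floordiv_two_mid_bounds (le_of_lt hlt)
      have hdiv : PySem.Int.floordiv (lo + hi) 2 = (lo + hi) / 2 :=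
        PySem.Int.floordiv_eq_ediv_of_pos (by omega)
      set mid := PySem.Int.floordiv (lo + hi) 2 with hmid
      have hmlt : mid < hi := by omega
      have hmn : mid.toNat < l.length := by omega
      have hget : PySem.List.pyGet? l mid = some l[mid.toNat] := by
        simp only [PySem.List.pyGet?, PySem.List.pyIdx?]
        rw [if_pos (by omega), if_pos (by omega)]
        simp [List.getElem?_eq_getElem hmn]
      rw [hget]
      simp only [Option.getD_some]
      have hiff := sorted_index_iff l hs mid.toNat hmn
      by_cases hgt : l[mid.toNat] > 5
      · rw [if_pos hgt]
        have hcm : (l.countP (fun x => x ≤ 5) : Int) ≤ mid := by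
          by_contra hcon
          have : l[mid.toNat] ≤ 5 := hiff.mpr (by omega)
          omega
        exact ih lo mid hlo (by omega) hc1 hcm (by omega)
      · rw [if_neg hgt]
        have hcm : mid + 1 ≤ (l.countP (fun x => x ≤ 5) : Int) := by
          have hle5 : l[mid.toNat] ≤ 5 := by omega
          have := hiff.mp hle5
          omega
        exact ih (mid + 1) hi (by omega) hhi hcm hc2 (by omega)
    · rw [if_neg hlt]
      omega

-- ===== VERDICT (by name: the statement is the Claim_ definition above) =====
theorem count_spec : Claim_equal_count := by
  intro lst _
  unfold Spec_count count count_alt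
  set lens := PySem.List.sorted (lst.map (fun s => PySem.Str.len s)) (fun x => x) false with hl
  have hperm : lens.Perm (lst.map (fun s => PySem.Str.len s)) := PySem.List.sorted_perm _ _ _
  have hsorted : lens.Pairwise (· ≤ ·) := by
    have := PySem.List.sorted_pairwise (xs := lst.map (fun s => PySem.Str.len s)) (key := fun x => x)
    simpa using this
  have hcount : lens.countP (fun x => x ≤ 5) = lst.countP (fun i => !decide (5 < PySem.Str.len i)) := by
    rw [hperm.countP_eq, List.countP_map]
    congr 1
    funext i
    simp [← decide_not, not_lt]
  have hlen : lens.length = lst.length := by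
    rw [hperm.length_eq, List.length_map]
  have hle : lens.countP (fun x => x ≤ 5) ≤ lens.length := List.countP_le_length
  have hbs := bsLoop_eq lens hsorted lens.length 0 (lens.length : Int)
    le_rfl le_rfl (by exact_mod_cast Nat.zero_le _) (by exact_mod_cast hle) (by omega)
  have hsplit : lst.countP (fun i => decide (5 < PySem.Str.len i))
      + lst.countP (fun i => !decide (5 < PySem.Str.len i)) = lst.length := by
    simpa [← decide_not, not_lt] using (List.length_eq_countP_add_countP (p := fun i => decide (5 < PySem.Str.len i)) (l := lst)).symm
  rw [count_fold]
  simp only [zero_add]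
  rw [hbs, hcount, hlen]
  simp only [Prod.ext_iff]
  constructor
  · omega
  · trivial
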